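-- pv_equiv track=rewrite | github.com/koenvorster/Personal_project_VorstersNV | api/routers/notifications.py | _parse_log_input
-- ===== SOURCE A (Python) =====
-- def _parse_log_input(user_input: str) -> tuple[str, str, str]:
--     """Parse gestruct e-mail log input terug naar velden."""
--     email_type, ontvanger_email, ontvanger_naam = "onbekend", "onbekend", "onbekend"
--     for line in user_input.splitlines():
--         if line.startswith("email_type: "):
--             email_type = line.removeprefix("email_type: ").strip()
--         elif line.startswith("ontvanger: "):
--             part = line.removeprefix("ontvanger: ").strip()
--             if "<" in part and ">" in part:
--                 ontvanger_naam = part.split("<")[0].strip()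
--                 ontvanger_email = part.split("<")[1].rstrip(">").strip()
--     return ontvanger_email, ontvanger_naam, email_type
-- ===== SOURCE B (Python) =====
-- def _parse_log_input(user_input: str) -> tuple[str, str, str]:
--     """Parse gestruct e-mail log input terug naar velden (reverse scan, early exit)."""
--     email_type = None
--     ontvanger = None  # (naam, email)
--     for line in reversed(user_input.splitlines()):
--         if email_type is None and line.startswith("email_type: "):
--             email_type = line.removeprefix("email_type: ").strip()
--         elif ontvanger is None and line.startswith("ontvanger: "):
--             part = line.removeprefix("ontvanger: ").strip()
--             if "<" in part and ">" in part:
--                 ontvanger = (part.split("<")[0].strip(),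
--                              part.split("<")[1].rstrip(">").strip())
--         if email_type is not None and ontvanger is not None:
--             break
--     naam, email = ontvanger if ontvanger is not None else ("onbekend", "onbekend")
--     return email, naam, (email_type if email_type is not None else "onbekend")
-- ===== Notes on version B (the rewrite author's own statement) =====
-- stated objective: alternative
-- what changed: Replaces A's forward last-wins fold over all lines by a reverse scan that takes the first matching email_type line and the first valid ontvanger line, skipping invalid ontvanger lines, and breaks early once both fields are resolved.
import Mathlib
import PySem

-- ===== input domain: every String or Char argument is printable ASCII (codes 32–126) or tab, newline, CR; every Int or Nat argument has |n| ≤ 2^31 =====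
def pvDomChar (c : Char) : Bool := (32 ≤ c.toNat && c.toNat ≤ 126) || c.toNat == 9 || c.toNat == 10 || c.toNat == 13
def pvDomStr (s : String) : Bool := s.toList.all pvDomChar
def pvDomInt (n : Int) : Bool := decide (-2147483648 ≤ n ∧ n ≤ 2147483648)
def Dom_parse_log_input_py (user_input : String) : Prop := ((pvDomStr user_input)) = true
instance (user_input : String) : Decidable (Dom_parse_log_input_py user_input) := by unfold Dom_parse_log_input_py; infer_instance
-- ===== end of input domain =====

-- B replaces A's forward last-wins pass by a reverse first-match scan with early exit (objective: alternative decomposition, same cost).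

-- s.removeprefix(p): drop p if s starts with it, else s unchanged (hand port, exact: removeprefix is not in PySem)
def pvRemovePrefix (s p : String) : String :=
  if PySem.Str.startswith s p then String.ofList (s.toList.drop p.toList.length) else s

-- s.rstrip(">"): drop all trailing '>' characters (hand port, exact: PySem has no right-only strip with a chars argument)
def pvRstripGt (s : String) : String :=
  String.ofList ((s.toList.reverse.dropWhile (· == '>')).reverse)

-- ===== PORT A =====
-- loop body of A; state = (email_type, ontvanger_email, ontvanger_naam)
def pvAStep (s : String × String × String) (line : String) : String × String × String :=
  if PySem.Str.startswith line "email_type: " then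
    (PySem.Str.strip (pvRemovePrefix line "email_type: "), s.2.1, s.2.2)
  else if PySem.Str.startswith line "ontvanger: " then
    let part := PySem.Str.strip (pvRemovePrefix line "ontvanger: ")
    if PySem.Str.isIn "<" part && PySem.Str.isIn ">" part then
      -- the guard guarantees part.split("<") has ≥ 2 pieces, so getD's default is never used
      (s.1, PySem.Str.strip (pvRstripGt (((PySem.Str.split? part "<").getD []).getD 1 "")),
            PySem.Str.strip (((PySem.Str.split? part "<").getD []).getD 0 ""))
    else s
  else s

def parse_log_input_py (user_input : String) : String × String × String :=
  let s := (PySem.Str.splitlines user_input).foldl pvAStep ("onbekend", "onbekend", "onbekend")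
  (s.2.1, s.2.2, s.1)

-- ===== PORT B =====
-- loop body of B: resolve the still-unresolved fields from one line
def pvBStep (t : Option String) (o : Option (String × String)) (line : String) :
    Option String × Option (String × String) :=
  if t.isNone && PySem.Str.startswith line "email_type: " then
    (some (PySem.Str.strip (pvRemovePrefix line "email_type: ")), o)
  else if o.isNone && PySem.Str.startswith line "ontvanger: " then
    let part := PySem.Str.strip (pvRemovePrefix line "ontvanger: ")
    if PySem.Str.isIn "<" part && PySem.Str.isIn ">" part then
      (t, some (PySem.Str.strip (((PySem.Str.split? part "<").getD []).getD 0 ""),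
                PySem.Str.strip (pvRstripGt (((PySem.Str.split? part "<").getD []).getD 1 ""))))
    else (t, o)
  else (t, o)

-- assemble the return tuple (ontvanger_email, ontvanger_naam, email_type) from the resolved fields
def pvFinish (t : Option String) (o : Option (String × String)) : String × String × String :=
  ((o.map Prod.snd).getD "onbekend", (o.map Prod.fst).getD "onbekend", t.getD "onbekend")

-- reverse scan with early exit ('break' once both fields are resolved)
def pvBGo : List String → Option String → Option (String × String) → String × String × String
  | [], t, o => pvFinish t o
  | line :: rest, t, o =>
    let p := pvBStep t o line
    if p.1.isSome && p.2.isSome then pvFinish p.1 p.2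
    else pvBGo rest p.1 p.2

def parse_log_input_py_alt (user_input : String) : String × String × String :=
  pvBGo (PySem.Str.splitlines user_input).reverse none none

-- ===== PRECONDITION & SPEC =====
def Spec_parse_log_input_py (user_input : String) (out : String × String × String) : Prop := out = parse_log_input_py_alt user_input
instance (user_input : String) (out : String × String × String) : Decidable (Spec_parse_log_input_py user_input out) := by unfold Spec_parse_log_input_py; infer_instance

-- ===== CLAIM (what is proved, stated in full; the proofs are below) =====
def Claim_equal_parse_log_input_py : Prop := ∀ (user_input : String), Dom_parse_log_input_py user_input → Spec_parse_log_input_py user_input (parse_log_input_py user_input)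

-- ===== LEMMAS AND PROOFS =====

-- the resolved options override the corresponding components of A's folded state
def pvOver (t : Option String) (o : Option (String × String)) (s : String × String × String) :
    String × String × String :=
  ((o.map Prod.snd).getD s.2.1, (o.map Prod.fst).getD s.2.2, t.getD s.1)

lemma pv_not_both_prefix (line : String)
    (h1 : PySem.Chars.startswith line.toList ['e', 'm', 'a', 'i', 'l', '_', 't', 'y', 'p', 'e', ':', ' '] = true)
    (h2 : PySem.Chars.startswith line.toList ['o', 'n', 't', 'v', 'a', 'n', 'g', 'e', 'r', ':', ' '] = true) : False := by
  rw [PySem.Chars.startswith_iff] at h1 h2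
  obtain ⟨u, hu⟩ := h1
  obtain ⟨v, hv⟩ := h2
  rw [← hu] at hv
  simp at hv

lemma pvStep_over (t : Option String) (o : Option (String × String))
    (line : String) (s : String × String × String) :
    pvOver t o (pvAStep s line) = pvOver (pvBStep t o line).1 (pvBStep t o line).2 s := by
  by_cases h1 : PySem.Chars.startswith line.toList ['e', 'm', 'a', 'i', 'l', '_', 't', 'y', 'p', 'e', ':', ' '] = true
  · by_cases h2 : PySem.Chars.startswith line.toList ['o', 'n', 't', 'v', 'a', 'n', 'g', 'e', 'r', ':', ' '] = true
    · exact (pv_not_both_prefix line h1 h2).elim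
    · cases t <;> cases o <;> simp [pvAStep, pvBStep, pvOver, h1, h2]
  · by_cases h2 : PySem.Chars.startswith line.toList ['o', 'n', 't', 'v', 'a', 'n', 'g', 'e', 'r', ':', ' '] = true
    · cases t <;> cases o <;> simp [pvAStep, pvBStep, pvOver, h1, h2] <;> split <;> simp
    · cases t <;> cases o <;> simp [pvAStep, pvBStep, pvOver, h1, h2]

lemma pvFinish_eq_over_of_some (t : Option String) (o : Option (String × String))
    (ht : t.isSome = true) (ho : o.isSome = true) (s : String × String × String) :
    pvFinish t o = pvOver t o s := by
  cases t with
  | none => simp at ht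
  | some a => cases o with
    | none => simp at ho
    | some b => simp [pvFinish, pvOver]

lemma pvBGo_eq_over (r : List String) :
    ∀ (t : Option String) (o : Option (String × String)),
    pvBGo r t o = pvOver t o (r.foldr (fun line s => pvAStep s line) ("onbekend", "onbekend", "onbekend")) := by
  induction r with
  | nil => intro t o; cases t <;> cases o <;> simp [pvBGo, pvFinish, pvOver]
  | cons line rest ih =>
    intro t o
    simp only [pvBGo, List.foldr_cons]
    rw [pvStep_over]
    split
    · next h =>
      simp only [Bool.and_eq_true] at h
      exact pvFinish_eq_over_of_some _ _ h.1 h.2 _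
    · exact ih _ _

-- ===== VERDICT (by name: the statement is the Claim_ definition above) =====
theorem parse_log_input_py_spec : Claim_equal_parse_log_input_py := by
  intro user_input _
  unfold Spec_parse_log_input_py parse_log_input_py parse_log_input_py_alt
  rw [pvBGo_eq_over, List.foldr_reverse]
  simp [pvOver]
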